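-- pv_equiv track=rewrite | github.com/brian-vdb/speech-recognition | analyze_build.py | align_word_arrays
-- ===== SOURCE A (Python) =====
-- def add_none_for_missing(result_array: list[str], target_size: int) -> list[str]:
--     # Append None values for insertions
--     while len(result_array) < target_size:
--         result_array.append(None)
--     return result_array
--
-- def align_word_arrays(value_alignments: list[int], transcript_words: list[str], audio_words: list[str]) -> tuple[list[str], list[str]]:
--     # Arrays Indices
--     transcript_index = 0
--     audio_index = 0
--     result_index = 0
--
--     # Result Arrays
--     aligned_transcript = []
--     aligned_audio = []
--
--     # Loop through the correct allignments
--     for i, allignment in enumerate(value_alignments):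
--         # Skips to the next iteration
--         if allignment == None:
--             continue
--
--         # Find errors in the transcript array
--         transcript_errors = 0
--         while transcript_index < i:
--             # Keep track of errors for result allignment
--             transcript_errors += 1
--
--             # Append the error incrementing the result index
--             aligned_transcript.append(transcript_words[transcript_index])
--             transcript_index += 1
--             result_index += 1
--
--         # Find errors in the audio array
--         while audio_index < allignment:
--             # Append the error
--             aligned_audio.append(audio_words[audio_index])
--             audio_index += 1
--
--             # Only start increasing the result index after matching the transcript errors
--             if transcript_errors > 0:
--                 transcript_errors -= 1
--             else:
--                 result_index += 1
--
--         # Append None values for missing values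
--         aligned_transcript = add_none_for_missing(aligned_transcript, result_index)
--         aligned_audio = add_none_for_missing(aligned_audio, result_index)
--
--         # Append the correctly alligned words
--         aligned_transcript.append(transcript_words[transcript_index])
--         aligned_audio.append(audio_words[audio_index])
--
--         # increment the indices for each correct allignment
--         transcript_index += 1
--         audio_index += 1
--         result_index += 1
--
--     # Find trailing errors for the transcript words
--     transcript_errors = 0
--     while transcript_index < len(transcript_words):
--         # Keep track of errors for result allignment
--         transcript_errors += 1
--
--         # Append the error incrementing the result index
--         aligned_transcript.append(transcript_words[transcript_index])
--         transcript_index += 1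
--         result_index += 1
--
--     # Find trailing errors for the audio words
--     while audio_index < len(audio_words):
--         # Append the error
--         aligned_audio.append(audio_words[audio_index])
--         audio_index += 1
--
--         # Only start increasing the result index after matching the transcript errors
--         if transcript_errors > 0:
--             transcript_errors -= 1
--         else:
--             result_index += 1
--
--     # Append None values for missing values
--     aligned_transcript = add_none_for_missing(aligned_transcript, result_index)
--     aligned_audio = add_none_for_missing(aligned_audio, result_index)
--
--     return aligned_transcript, aligned_audio
-- ===== SOURCE B (Python) =====
-- def _emit_block(aligned_transcript, aligned_audio, t_block, a_block):
--     # Pair the two pending error blocks row-by-row, padding the shorter with None.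
--     n = max(len(t_block), len(a_block))
--     aligned_transcript += t_block + [None] * (n - len(t_block))
--     aligned_audio += a_block + [None] * (n - len(a_block))
--
-- def align_word_arrays(value_alignments, transcript_words, audio_words):
--     aligned_transcript = []
--     aligned_audio = []
--     ti = 0
--     ai = 0
--     for i, a in enumerate(value_alignments):
--         if a is None:
--             continue
--         _emit_block(aligned_transcript, aligned_audio,
--                     transcript_words[ti:i], audio_words[ai:a])
--         aligned_transcript.append(transcript_words[i])
--         aligned_audio.append(audio_words[a])
--         ti, ai = i + 1, a + 1
--     _emit_block(aligned_transcript, aligned_audio,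
--                 transcript_words[ti:], audio_words[ai:])
--     return aligned_transcript, aligned_audio
-- ===== Notes on version B (the rewrite author's own statement) =====
-- stated objective: simpler
-- what changed: Replaces A's result_index/transcript_errors counter bookkeeping with post-hoc None-padding by a direct block decomposition: per matched alignment, slice both arrays' pending error words, pair the two blocks row-by-row padding the shorter with None, then append the matched pair.
-- outside the precondition, e.g. on align_word_arrays([-5], ['t0'], ['a0']): A returns (['t0'], ['a0']), B raises IndexError
import Mathlib
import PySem

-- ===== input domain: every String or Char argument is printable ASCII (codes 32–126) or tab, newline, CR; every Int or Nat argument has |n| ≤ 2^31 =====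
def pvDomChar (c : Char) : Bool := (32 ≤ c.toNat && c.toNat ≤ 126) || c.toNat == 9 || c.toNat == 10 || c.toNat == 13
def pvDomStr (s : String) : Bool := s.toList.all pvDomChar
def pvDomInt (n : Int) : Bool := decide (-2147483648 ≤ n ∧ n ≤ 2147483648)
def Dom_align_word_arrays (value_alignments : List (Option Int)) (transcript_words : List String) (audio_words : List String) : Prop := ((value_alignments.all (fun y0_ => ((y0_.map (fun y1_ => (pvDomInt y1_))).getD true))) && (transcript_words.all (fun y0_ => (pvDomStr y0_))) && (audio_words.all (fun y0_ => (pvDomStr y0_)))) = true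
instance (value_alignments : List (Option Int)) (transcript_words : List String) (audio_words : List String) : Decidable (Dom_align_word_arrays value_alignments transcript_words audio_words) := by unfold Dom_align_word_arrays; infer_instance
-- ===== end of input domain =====

-- B replaces A's result_index/transcript_errors counters and post-hoc None padding with a direct
-- block decomposition (slice both pending error blocks per match, pair them padding with None).
-- A mutates its result_array argument in add_none_for_missing only on lists it created itself, so
-- no caller-visible mutation is at stake; the equivalence is about the return value.

-- ===== PORT A =====
-- add_none_for_missing: while len < target append None (indices here are Nat since they only grow from 0)
def pvAddNone (arr : List (Option String)) (target : Nat) : List (Option String) :=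
  if arr.length < target then pvAddNone (arr ++ [none]) target else arr
termination_by target - arr.length
decreasing_by simp at *; omega

-- 'while transcript_index < i' loop; transcript_words[ti] via getD "" (exact inside Pre_, where ti < len)
def pvTloopA (tw : List String) (i : Int) (ti ri terrs : Nat) (acc : List (Option String)) :
    Nat × Nat × Nat × List (Option String) :=
  if (ti : Int) < i then
    pvTloopA tw i (ti + 1) (ri + 1) (terrs + 1) (acc ++ [some (tw.getD ti "")])
  else (ti, ri, terrs, acc)
termination_by (i - ti).toNat
decreasing_by omega

-- 'while audio_index < allignment' loop
def pvAloopA (aw : List String) (a : Int) (ai ri terrs : Nat) (acc : List (Option String)) :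
    Nat × Nat × List (Option String) :=
  if (ai : Int) < a then
    if terrs > 0 then pvAloopA aw a (ai + 1) ri (terrs - 1) (acc ++ [some (aw.getD ai "")])
    else pvAloopA aw a (ai + 1) (ri + 1) terrs (acc ++ [some (aw.getD ai "")])
  else (ai, ri, acc)
termination_by (a - ai).toNat
decreasing_by all_goals omega

-- one iteration of A's for-loop; state = (transcript_index, audio_index, result_index, aligned_transcript, aligned_audio)
def pvStepA (tw aw : List String)
    (s : Nat × Nat × Nat × List (Option String) × List (Option String)) (p : Int × Option Int) :
    Nat × Nat × Nat × List (Option String) × List (Option String) :=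
  match p.2 with
  | none => s
  | some a =>
    let r1 := pvTloopA tw p.1 s.1 s.2.2.1 0 s.2.2.2.1
    let r2 := pvAloopA aw a s.2.1 r1.2.1 r1.2.2.1 s.2.2.2.2
    let at2 := pvAddNone r1.2.2.2 r2.2.1
    let aa2 := pvAddNone r2.2.2 r2.2.1
    (r1.1 + 1, r2.1 + 1, r2.2.1 + 1,
     at2 ++ [some (tw.getD r1.1 "")], aa2 ++ [some (aw.getD r2.1 "")])

-- trailing-errors part after the for-loop
def pvFinA (tw aw : List String)
    (s : Nat × Nat × Nat × List (Option String) × List (Option String)) :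
    List (Option String) × List (Option String) :=
  let r1 := pvTloopA tw (tw.length : Int) s.1 s.2.2.1 0 s.2.2.2.1
  let r2 := pvAloopA aw (aw.length : Int) s.2.1 r1.2.1 r1.2.2.1 s.2.2.2.2
  (pvAddNone r1.2.2.2 r2.2.1, pvAddNone r2.2.2 r2.2.1)

def align_word_arrays (value_alignments : List (Option Int)) (transcript_words : List String)
    (audio_words : List String) : List (Option String) × List (Option String) :=
  pvFinA transcript_words audio_words
    ((PySem.List.enumerate value_alignments 0).foldl (pvStepA transcript_words audio_words)
      (0, 0, 0, [], []))

-- ===== PORT B =====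
-- _emit_block: pair the two pending error blocks row-by-row, padding the shorter with None
def pvEmitB (at_ aa : List (Option String)) (tb ab : List String) :
    List (Option String) × List (Option String) :=
  let n := max tb.length ab.length
  (at_ ++ (tb.map some ++ List.replicate (n - tb.length) none),
   aa ++ (ab.map some ++ List.replicate (n - ab.length) none))

-- one iteration of B's for-loop; state = (ti, ai, aligned_transcript, aligned_audio)
def pvStepB (tw aw : List String)
    (s : Int × Int × List (Option String) × List (Option String)) (p : Int × Option Int) :
    Int × Int × List (Option String) × List (Option String) :=
  match p.2 with
  | none => s
  | some a =>
    let e := pvEmitB s.2.2.1 s.2.2.2 (PySem.List.slice tw (some s.1) (some p.1))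
      (PySem.List.slice aw (some s.2.1) (some a))
    (p.1 + 1, a + 1,
     e.1 ++ [some (PySem.List.pyGetD tw p.1 "")], e.2 ++ [some (PySem.List.pyGetD aw a "")])

-- trailing emit after the loop
def pvFinB (tw aw : List String) (s : Int × Int × List (Option String) × List (Option String)) :
    List (Option String) × List (Option String) :=
  pvEmitB s.2.2.1 s.2.2.2 (PySem.List.slice tw (some s.1) none) (PySem.List.slice aw (some s.2.1) none)

def align_word_arrays_alt (value_alignments : List (Option Int)) (transcript_words : List String)
    (audio_words : List String) : List (Option String) × List (Option String) :=
  pvFinB transcript_words audio_words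
    ((PySem.List.enumerate value_alignments 0).foldl (pvStepB transcript_words audio_words)
      (0, 0, [], []))

-- ===== PRECONDITION & SPEC =====
-- Pre_ restricts to well-formed alignments — the function's natural domain: a non-None entry only at a
-- position inside the transcript, and the non-None alignment values strictly increasing and in range of
-- the audio array. Outside it A either raises IndexError or dereferences stale leftover indices and
-- returns accidental values (see the cited examples).
def Pre_align_word_arrays (value_alignments : List (Option Int)) (transcript_words : List String)
    (audio_words : List String) : Prop :=
  ((value_alignments.drop transcript_words.length).all Option.isNone = true) ∧
  ((value_alignments.filterMap id).Pairwise (· < ·)) ∧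
  (∀ a ∈ value_alignments.filterMap id, 0 ≤ a ∧ a < (audio_words.length : Int))
instance (value_alignments : List (Option Int)) (transcript_words : List String) (audio_words : List String) : Decidable (Pre_align_word_arrays value_alignments transcript_words audio_words) := by unfold Pre_align_word_arrays; infer_instance

def pvWitness_align_word_arrays : List (Option Int) × List String × List String :=
  ([some 0, none, some 2], ["a", "b", "c"], ["x", "y", "z"])

def Spec_align_word_arrays (value_alignments : List (Option Int)) (transcript_words : List String) (audio_words : List String) (out : List (Option String) × List (Option String)) : Prop := out = align_word_arrays_alt value_alignments transcript_words audio_words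
instance (value_alignments : List (Option Int)) (transcript_words : List String) (audio_words : List String) (out : List (Option String) × List (Option String)) : Decidable (Spec_align_word_arrays value_alignments transcript_words audio_words out) := by unfold Spec_align_word_arrays; infer_instance

-- ===== CLAIM (what is proved, stated in full; the proofs are below) =====
def Claim_equal_align_word_arrays : Prop := ∀ (value_alignments : List (Option Int)) (transcript_words : List String) (audio_words : List String), Dom_align_word_arrays value_alignments transcript_words audio_words → Pre_align_word_arrays value_alignments transcript_words audio_words → Spec_align_word_arrays value_alignments transcript_words audio_words (align_word_arrays value_alignments transcript_words audio_words)

-- ===== LEMMAS AND PROOFS =====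

theorem pvPadCongr (xs ys : List (Option String)) {m m' : Nat} (h : m = m') :
    xs ++ (ys ++ List.replicate m (none : Option String))
      = xs ++ (ys ++ List.replicate m' (none : Option String)) := by rw [h]

theorem pvPadCongr2 (xs ys : List (Option String)) (z : Option String) {m m' : Nat} (h : m = m') :
    xs ++ (ys ++ (List.replicate m (none : Option String) ++ [z]))
      = xs ++ (ys ++ (List.replicate m' (none : Option String) ++ [z])) := by rw [h]

theorem pvAddNone_eq (arr : List (Option String)) (t : Nat) :
    pvAddNone arr t = arr ++ List.replicate (t - arr.length) none := by
  fun_induction pvAddNone arr t with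
  | case1 arr h ih =>
    rw [ih]
    have h3 : t - arr.length = (t - (arr ++ [none]).length) + 1 := by
      simp only [List.length_append, List.length_cons, List.length_nil]; omega
    rw [h3, List.replicate_succ]
    simp
  | case2 arr h =>
    have h3 : t - arr.length = 0 := by omega
    simp [h3]

theorem pvTloopA_eq (tw : List String) (i : Int) (ti ri terrs : Nat) (acc : List (Option String))
    (h1 : (ti : Int) ≤ i) (h2 : i ≤ (tw.length : Int)) :
    pvTloopA tw i ti ri terrs acc =
      (i.toNat, ri + (i.toNat - ti), terrs + (i.toNat - ti),
       acc ++ ((tw.drop ti).take (i.toNat - ti)).map some) := by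
  fun_induction pvTloopA tw i ti ri terrs acc with
  | case1 ti ri terrs acc h ih =>
    rw [ih (by omega)]
    have hlt : ti < tw.length := by omega
    have h3 : i.toNat - ti = (i.toNat - (ti + 1)) + 1 := by omega
    rw [h3, ← List.getElem_cons_drop hlt, List.take_succ_cons,
        List.getD_eq_getElem tw "" hlt]
    simp only [Prod.mk.injEq, List.map_cons, List.append_assoc, List.singleton_append]
    and_intros <;> first | trivial | omega
  | case2 ti ri terrs acc h =>
    have h3 : i.toNat = ti := by omega
    simp [h3]

theorem pvAloopA_eq (aw : List String) (a : Int) (ai ri terrs : Nat) (acc : List (Option String))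
    (h1 : (ai : Int) ≤ a) (h2 : a ≤ (aw.length : Int)) :
    pvAloopA aw a ai ri terrs acc =
      (a.toNat, ri + ((a.toNat - ai) - terrs),
       acc ++ ((aw.drop ai).take (a.toNat - ai)).map some) := by
  fun_induction pvAloopA aw a ai ri terrs acc with
  | case1 ai ri terrs acc h ht ih =>
    rw [ih (by omega)]
    have hlt : ai < aw.length := by omega
    have h3 : a.toNat - ai = (a.toNat - (ai + 1)) + 1 := by omega
    rw [h3, ← List.getElem_cons_drop hlt, List.take_succ_cons,
        List.getD_eq_getElem aw "" hlt]
    simp only [Prod.mk.injEq, List.map_cons, List.append_assoc, List.singleton_append]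
    and_intros <;> first | trivial | omega
  | case2 ai ri terrs acc h ht ih =>
    rw [ih (by omega)]
    have hlt : ai < aw.length := by omega
    have h3 : a.toNat - ai = (a.toNat - (ai + 1)) + 1 := by omega
    rw [h3, ← List.getElem_cons_drop hlt, List.take_succ_cons,
        List.getD_eq_getElem aw "" hlt]
    simp only [Prod.mk.injEq, List.map_cons, List.append_assoc, List.singleton_append]
    and_intros <;> first | trivial | omega
  | case3 ai ri terrs acc h =>
    have h3 : a.toNat = ai := by omega
    simp [h3]

theorem pvMain (tw aw : List String) (l : List (Option Int)) :
    ∀ (k ti ai : Nat) (at_ aa : List (Option String)),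
    ti ≤ k → ti ≤ tw.length → ai ≤ aw.length → aa.length = at_.length →
    (∀ (j : Nat) (a : Int), l[j]? = some (some a) → k + j < tw.length) →
    ((l.filterMap id).Pairwise (· < ·)) →
    (∀ a ∈ l.filterMap id, (ai : Int) ≤ a ∧ a < (aw.length : Int)) →
    pvFinA tw aw ((PySem.List.enumerate l (k : Int)).foldl (pvStepA tw aw)
        (ti, ai, at_.length, at_, aa))
      = pvFinB tw aw ((PySem.List.enumerate l (k : Int)).foldl (pvStepB tw aw)
        ((ti : Int), (ai : Int), at_, aa)) := by
  induction l with
  | nil =>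
    intro k ti ai at_ aa hk htw haw hlen _ _ _
    rw [PySem.List.enumerate_nil]
    simp only [List.foldl_nil]
    unfold pvFinA pvFinB
    rw [pvTloopA_eq tw (tw.length : Int) ti at_.length 0 at_ (by omega) le_rfl]
    simp only [Int.toNat_natCast]
    rw [pvAloopA_eq aw (aw.length : Int) ai _ _ aa (by omega) le_rfl]
    simp only [Int.toNat_natCast]
    rw [pvAddNone_eq, pvAddNone_eq]
    unfold pvEmitB
    rw [PySem.List.slice_from_natCast, PySem.List.slice_from_natCast]
    have htb : (tw.drop ti).take (tw.length - ti) = tw.drop ti := by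
      apply List.take_of_length_le; simp
    have hab : (aw.drop ai).take (aw.length - ai) = aw.drop ai := by
      apply List.take_of_length_le; simp
    rw [htb, hab]
    simp only [Prod.mk.injEq, List.length_append, List.length_map, List.length_drop,
      List.append_assoc]
    exact ⟨pvPadCongr _ _ (by omega), pvPadCongr _ _ (by omega)⟩
  | cons o l' ih =>
    intro k ti ai at_ aa hk htw haw hlen hpos hmono hbd
    rw [PySem.List.enumerate_cons]
    cases o with
    | none =>
      simp only [List.foldl_cons, pvStepA, pvStepB]
      have hc : (k : Int) + 1 = ((k + 1 : Nat) : Int) := by push_cast; ring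
      rw [hc]
      exact ih (k + 1) ti ai at_ aa (by omega) htw haw hlen
        (fun j a hja => by
          have := hpos (j + 1) a (by simpa using hja)
          omega)
        (by simpa using hmono)
        (fun a hma => hbd a (by simpa using hma))
    | some a =>
      have hfm : (some a :: l').filterMap id = a :: l'.filterMap id := by simp
      have hbda : (ai : Int) ≤ a ∧ a < (aw.length : Int) := by
        apply hbd; rw [hfm]; exact List.mem_cons_self ..
      obtain ⟨hba1, hba2⟩ := hbda
      have ha0 : 0 ≤ a := le_trans (by omega) hba1
      have hklt : k < tw.length := by simpa using hpos 0 a (by simp)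
      have haiA : ai ≤ a.toNat := by omega
      have haA : a.toNat < aw.length := by omega
      have hta : ((tw.drop ti).take (k - ti)).length = k - ti := by
        simp; omega
      have haa2 : ((aw.drop ai).take (a.toNat - ai)).length = a.toNat - ai := by
        simp; omega
      simp only [List.foldl_cons]
      have hstepA : pvStepA tw aw (ti, ai, at_.length, at_, aa) ((k : Int), some a) =
          (k + 1, a.toNat + 1,
           at_.length + max (k - ti) (a.toNat - ai) + 1,
           at_ ++ (((tw.drop ti).take (k - ti)).map some ++
              (List.replicate (max (k - ti) (a.toNat - ai) - (k - ti)) none ++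
              [some (tw.getD k "")])),
           aa ++ (((aw.drop ai).take (a.toNat - ai)).map some ++
              (List.replicate (max (k - ti) (a.toNat - ai) - (a.toNat - ai)) none ++
              [some (aw.getD a.toNat "")]))) := by
        simp only [pvStepA]
        rw [pvTloopA_eq tw (k : Int) ti at_.length 0 at_ (by omega) (by omega)]
        simp only [Int.toNat_natCast]
        rw [pvAloopA_eq aw a ai _ _ aa (by omega) (by omega)]
        simp only
        rw [pvAddNone_eq, pvAddNone_eq]
        simp only [Prod.mk.injEq, List.length_append, List.length_map, hta, haa2, List.append_assoc]
        and_intros <;> first | trivial | omega | exact pvPadCongr2 _ _ _ (by omega)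
      have hstepB : pvStepB tw aw ((ti : Int), (ai : Int), at_, aa) ((k : Int), some a) =
          (((k + 1 : Nat) : Int), ((a.toNat + 1 : Nat) : Int),
           at_ ++ (((tw.drop ti).take (k - ti)).map some ++
              (List.replicate (max (k - ti) (a.toNat - ai) - (k - ti)) none ++
              [some (tw.getD k "")])),
           aa ++ (((aw.drop ai).take (a.toNat - ai)).map some ++
              (List.replicate (max (k - ti) (a.toNat - ai) - (a.toNat - ai)) none ++
              [some (aw.getD a.toNat "")]))) := by
        simp only [pvStepB, pvEmitB]
        rw [PySem.List.slice_natCast]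
        rw [show a = ((a.toNat : Nat) : Int) from (Int.toNat_of_nonneg ha0).symm]
        rw [PySem.List.slice_natCast]
        simp only [Int.toNat_natCast, PySem.List.pyGetD_natCast, hta, haa2,
          Prod.mk.injEq, List.append_assoc]
        and_intros <;> trivial
      rw [hstepA, hstepB]
      have hlenA : at_.length + max (k - ti) (a.toNat - ai) + 1 =
          (at_ ++ (((tw.drop ti).take (k - ti)).map some ++
            (List.replicate (max (k - ti) (a.toNat - ai) - (k - ti)) none ++
            [some (tw.getD k "")]))).length := by
        simp only [List.length_append, List.length_map, List.length_replicate,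
          List.length_cons, List.length_nil, hta]
        omega
      rw [hlenA]
      exact ih (k + 1) (k + 1) (a.toNat + 1) _ _ le_rfl (by omega) (by omega)
        (by simp only [List.length_append, List.length_map, List.length_replicate,
              List.length_cons, List.length_nil, hta, haa2, hlen]; omega)
        (fun j b hjb => by
          have := hpos (j + 1) b (by simpa using hjb)
          omega)
        (by rw [hfm] at hmono; exact hmono.of_cons)
        (fun b hmb => by
          rw [hfm] at hmono hbd
          have h1 := (List.pairwise_cons.mp hmono).1 b hmb
          have h2 := hbd b (List.mem_cons_of_mem _ hmb)
          exact ⟨by push_cast; omega, h2.2⟩)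

-- ===== VERDICT (by name: the statement is the Claim_ definition above) =====
theorem align_word_arrays_spec : Claim_equal_align_word_arrays := by
  intro va tw aw _ hpre
  unfold Spec_align_word_arrays align_word_arrays align_word_arrays_alt
  have := pvMain tw aw va 0 0 0 [] [] le_rfl (Nat.zero_le _) (Nat.zero_le _) rfl
    (fun j a hja => by
      by_contra hc
      have hj : tw.length ≤ j := by omega
      have hdj : (va.drop tw.length)[j - tw.length]? = some (some a) := by
        rw [List.getElem?_drop]
        rwa [Nat.add_sub_cancel' hj]
      have hmem : (some a) ∈ va.drop tw.length := List.mem_of_getElem? hdj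
      have := (List.all_eq_true.mp hpre.1) _ hmem
      simp at this)
    hpre.2.1
    (fun a hma => ⟨(hpre.2.2 a hma).1, (hpre.2.2 a hma).2⟩)
  simpa using this
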